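-- pv_equiv track=rewrite | github.com/lexxx233/wsi_ann_from_frame | sr_parser.py | divide_frame
-- ===== SOURCE A (Python) =====
-- import math
--
-- def divide_frame(area_coordiate, x_dim, y_dim):
--     """
--     Divide a rectangular polygon into sub rectangular polygon of size x_dim by y_dim
--
--     :param area_coordiate:
--     :param x_dim:
--     :param y_dim:
--     :return:
--     """
--     sub_frames = []
--
--     rect_width = area_coordiate[2][0] - area_coordiate[0][0]
--     rect_height = area_coordiate[2][1] - area_coordiate[0][1]
--
--     assert (rect_width > 0 and rect_height > 0)
--
--     num_x_frames = int(math.ceil(rect_width / x_dim))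
--     num_y_frames = int(math.ceil(rect_height / y_dim))
--
--     for ix in range(num_x_frames):
--         for iy in range(num_y_frames):
--             sub_p0 = (area_coordiate[0][0] + ix * x_dim, area_coordiate[0][1] + iy * y_dim)
--             sub_p1 = (area_coordiate[0][0] + ix * x_dim, area_coordiate[0][1] + (iy + 1) * y_dim)
--             sub_p2 = (area_coordiate[0][0] + (ix + 1) * x_dim, area_coordiate[0][1] + (iy + 1) * y_dim)
--             sub_p3 = (area_coordiate[0][0] + (ix + 1) * x_dim, area_coordiate[0][1] + iy * y_dim)
--
--             sub_frames.append([sub_p0, sub_p1, sub_p2, sub_p3])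
--
--     return sub_frames
-- ===== SOURCE B (Python) =====
-- import math
--
-- def divide_frame(area_coordiate, x_dim, y_dim):
--     """Build the first column of cells once with a running y-coordinate, then
--     generate every other column by translating that prototype column in x."""
--     x0, y0 = area_coordiate[0][0], area_coordiate[0][1]
--     rect_width = area_coordiate[2][0] - x0
--     rect_height = area_coordiate[2][1] - y0
--     assert (rect_width > 0 and rect_height > 0)
--
--     num_x = int(math.ceil(rect_width / x_dim))
--     num_y = int(math.ceil(rect_height / y_dim))
--
--     # prototype column (the cells at the leftmost strip), via a running edge
--     column = []
--     ya = y0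
--     for _ in range(num_y):
--         yb = ya + y_dim
--         column.append([(x0, ya), (x0, yb), (x0 + x_dim, yb), (x0 + x_dim, ya)])
--         ya = yb
--
--     # every column is the prototype translated by a running x-offset
--     out = []
--     shift = 0
--     for _ in range(num_x):
--         for cell in column:
--             out.append([(px + shift, py) for (px, py) in cell])
--         shift += x_dim
--     return out
-- ===== Notes on version B (the rewrite author's own statement) =====
-- stated objective: alternative
-- what changed: B builds only the leftmost column of cells once with a running y-edge accumulator, then generates every other column by translating that prototype column with a running x-offset, instead of A's per-cell index-times-dimension arithmetic inside a nested loop over all (ix, iy) pairs.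
import Mathlib
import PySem

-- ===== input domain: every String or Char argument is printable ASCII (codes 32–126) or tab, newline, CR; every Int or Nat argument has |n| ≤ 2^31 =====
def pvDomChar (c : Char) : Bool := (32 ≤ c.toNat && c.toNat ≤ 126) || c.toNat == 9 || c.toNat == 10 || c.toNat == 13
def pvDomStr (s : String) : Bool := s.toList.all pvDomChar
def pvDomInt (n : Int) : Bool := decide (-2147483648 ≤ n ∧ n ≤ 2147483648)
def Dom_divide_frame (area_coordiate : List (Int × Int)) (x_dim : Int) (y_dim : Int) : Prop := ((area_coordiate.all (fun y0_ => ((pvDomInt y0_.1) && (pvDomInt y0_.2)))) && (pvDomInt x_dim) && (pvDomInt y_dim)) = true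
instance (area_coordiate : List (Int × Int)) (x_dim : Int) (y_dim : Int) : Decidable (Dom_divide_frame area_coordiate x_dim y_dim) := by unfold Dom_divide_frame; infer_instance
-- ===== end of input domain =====

-- B builds the leftmost column of cells once with a running y-edge, then emits the whole
-- grid by translating that prototype column across x with a running offset (objective:
-- alternative — no per-cell index arithmetic).

-- ===== PORT A =====
-- int(math.ceil(a / b)) on ints is ported as exact ceiling division -((-a)//b): on Dom
-- the float quotient a/b is too far (≥ 1/|b| > half an ulp, since |a|+|b| < 2^52) from
-- any integer it does not hit exactly, so math.ceil of it equals the exact ceiling.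
def divide_frame (area_coordiate : List (Int × Int)) (x_dim : Int) (y_dim : Int) : List (List (Int × Int)) :=
  match PySem.List.pyGet? area_coordiate 0, PySem.List.pyGet? area_coordiate 2 with
  | some p0, some p2 =>
    let rect_width := p2.1 - p0.1
    let rect_height := p2.2 - p0.2
    if rect_width > 0 ∧ rect_height > 0 then          -- assert; Pre_ excludes failure
      if x_dim ≠ 0 ∧ y_dim ≠ 0 then                   -- ZeroDivisionError; Pre_ excludes
        let num_x_frames := -(PySem.Int.floordiv (-rect_width) x_dim)
        let num_y_frames := -(PySem.Int.floordiv (-rect_height) y_dim)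
        (PySem.List.pyRange 0 num_x_frames 1).foldl (fun acc ix =>
          (PySem.List.pyRange 0 num_y_frames 1).foldl (fun acc iy =>
            acc ++ [[(p0.1 + ix * x_dim, p0.2 + iy * y_dim),
                     (p0.1 + ix * x_dim, p0.2 + (iy + 1) * y_dim),
                     (p0.1 + (ix + 1) * x_dim, p0.2 + (iy + 1) * y_dim),
                     (p0.1 + (ix + 1) * x_dim, p0.2 + iy * y_dim)]]) acc) []
      else []
    else []
  | _, _ => []                                        -- IndexError; Pre_ excludes

-- ===== PORT B =====
def divide_frame_alt (area_coordiate : List (Int × Int)) (x_dim : Int) (y_dim : Int) : List (List (Int × Int)) :=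
  (((PySem.List.pyGet? area_coordiate 0).bind (fun p0 =>
    (PySem.List.pyGet? area_coordiate 2).map (fun p2 =>
      let rect_width := p2.1 - p0.1
      let rect_height := p2.2 - p0.2
      if rect_width > 0 ∧ rect_height > 0 ∧ x_dim ≠ 0 ∧ y_dim ≠ 0 then
        let num_x := -(PySem.Int.floordiv (-rect_width) x_dim)
        let num_y := -(PySem.Int.floordiv (-rect_height) y_dim)
        -- prototype column: running y-edge accumulator
        let column := ((PySem.List.pyRange 0 num_y 1).foldl
          (fun (st : List (List (Int × Int)) × Int) _ =>
            let ya := st.2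
            let yb := ya + y_dim
            (st.1 ++ [[(p0.1, ya), (p0.1, yb), (p0.1 + x_dim, yb), (p0.1 + x_dim, ya)]], yb))
          ([], p0.2)).1
        -- translate the prototype column across x with a running shift
        ((PySem.List.pyRange 0 num_x 1).foldl
          (fun (st : List (List (Int × Int)) × Int) _ =>
            (st.1 ++ column.map (fun cell => cell.map (fun p => (p.1 + st.2, p.2))),
             st.2 + x_dim))
          ([], 0)).1
      else []))).getD [])

-- ===== PRECONDITION & SPEC =====
-- Pre_ excludes exactly the inputs where A raises: fewer than three vertices (IndexError),
-- a non-positive width or height (AssertionError), a zero tile dimension (ZeroDivisionError).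
def Pre_divide_frame (area_coordiate : List (Int × Int)) (x_dim : Int) (y_dim : Int) : Prop :=
  3 ≤ area_coordiate.length ∧
  (area_coordiate.getD 0 (0, 0)).1 < (area_coordiate.getD 2 (0, 0)).1 ∧
  (area_coordiate.getD 0 (0, 0)).2 < (area_coordiate.getD 2 (0, 0)).2 ∧
  x_dim ≠ 0 ∧ y_dim ≠ 0
instance (area_coordiate : List (Int × Int)) (x_dim : Int) (y_dim : Int) : Decidable (Pre_divide_frame area_coordiate x_dim y_dim) := by unfold Pre_divide_frame; infer_instance

def pvWitness_divide_frame : (List (Int × Int)) × Int × Int := ([(0, 0), (4, 0), (4, 3), (0, 3)], 2, 2)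

def Spec_divide_frame (area_coordiate : List (Int × Int)) (x_dim : Int) (y_dim : Int) (out : List (List (Int × Int))) : Prop := out = divide_frame_alt area_coordiate x_dim y_dim
instance (area_coordiate : List (Int × Int)) (x_dim : Int) (y_dim : Int) (out : List (List (Int × Int))) : Decidable (Spec_divide_frame area_coordiate x_dim y_dim out) := by unfold Spec_divide_frame; infer_instance

-- ===== CLAIM (what is proved, stated in full; the proofs are below) =====
def Claim_equal_divide_frame : Prop := ∀ (area_coordiate : List (Int × Int)) (x_dim : Int) (y_dim : Int), Dom_divide_frame area_coordiate x_dim y_dim → Pre_divide_frame area_coordiate x_dim y_dim → Spec_divide_frame area_coordiate x_dim y_dim (divide_frame area_coordiate x_dim y_dim)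

-- ===== LEMMAS AND PROOFS =====

lemma pyRange_zero_toNat (b : Int) :
    PySem.List.pyRange 0 b 1 = (List.range b.toNat).map (fun (k : Nat) => (k : Int)) := by
  rcases le_or_gt 0 b with h | h
  · conv_lhs => rw [← Int.toNat_of_nonneg h]
    exact PySem.List.pyRange_zero_natCast b.toNat
  · have h1 : (PySem.List.pyRange 0 b 1).length = 0 := by
      rw [PySem.List.length_pyRange_one]; omega
    have h2 : b.toNat = 0 := by omega
    rw [h2, List.length_eq_zero_iff.mp h1]; rfl

-- peeling the first index off a mapped range
lemma range_map_shift {α : Type} (n : Nat) (f : Int → α) :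
    (List.range (n + 1)).map (fun (k : Nat) => f (k : Int))
      = f 0 :: (List.range n).map (fun (k : Nat) => f ((k : Int) + 1)) := by
  rw [List.range_succ_eq_map, List.map_cons, List.map_map]
  simp [Function.comp_def]

-- peeling the first index off a flatMapped range
lemma range_flatMap_shift {α : Type} (n : Nat) (f : Int → List α) :
    (List.range (n + 1)).flatMap (fun (k : Nat) => f (k : Int))
      = f 0 ++ (List.range n).flatMap (fun (k : Nat) => f ((k : Int) + 1)) := by
  rw [List.range_succ_eq_map, List.flatMap_cons, List.flatMap_map]
  simp

-- B's column fold: running y-edge accumulator characterised as a map over indices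
lemma col_fold (x0 yd xd : Int) (l : List Int) (acc : List (List (Int × Int))) (ya : Int) :
    l.foldl (fun (st : List (List (Int × Int)) × Int) _ =>
        (st.1 ++ [[(x0, st.2), (x0, st.2 + yd), (x0 + xd, st.2 + yd), (x0 + xd, st.2)]],
         st.2 + yd)) (acc, ya)
      = (acc ++ (List.range l.length).map (fun (k : Nat) =>
            [(x0, ya + (k : Int) * yd), (x0, ya + (k : Int) * yd + yd),
             (x0 + xd, ya + (k : Int) * yd + yd), (x0 + xd, ya + (k : Int) * yd)]),
         ya + l.length * yd) := by
  induction l generalizing acc ya with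
  | nil => simp
  | cons a t ih =>
    simp only [List.foldl_cons, ih]
    rw [Prod.mk.injEq]
    constructor
    · rw [List.length_cons,
        range_map_shift t.length (fun u =>
          [(x0, ya + u * yd), (x0, ya + u * yd + yd),
           (x0 + xd, ya + u * yd + yd), (x0 + xd, ya + u * yd)]),
        List.append_assoc, List.singleton_append]
      congr 1
      congr 1
      · norm_num
      · refine List.map_congr_left (fun k _ => ?_)
        simp only [List.cons.injEq, Prod.mk.injEq]
        and_intros <;> (first | trivial | ring)
    · simp only [List.length_cons]
      push_cast
      ring

-- B's outer fold: running x-shift characterised as a flatMap over column indices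
lemma shift_fold (xd : Int) (column : List (List (Int × Int))) (l : List Int)
    (acc : List (List (Int × Int))) (s : Int) :
    l.foldl (fun (st : List (List (Int × Int)) × Int) _ =>
        (st.1 ++ column.map (fun cell => cell.map (fun p => (p.1 + st.2, p.2))),
         st.2 + xd)) (acc, s)
      = (acc ++ (List.range l.length).flatMap (fun (k : Nat) =>
            column.map (fun cell => cell.map (fun p => (p.1 + (s + (k : Int) * xd), p.2)))),
         s + l.length * xd) := by
  induction l generalizing acc s with
  | nil => simp
  | cons a t ih =>
    simp only [List.foldl_cons, ih]
    rw [Prod.mk.injEq]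
    constructor
    · rw [List.length_cons,
        range_flatMap_shift t.length (fun u =>
          column.map (fun cell => cell.map (fun p => (p.1 + (s + u * xd), p.2)))),
        List.append_assoc]
      congr 1
      congr 1
      · simp
      · refine List.flatMap_congr (fun k _ => ?_)
        have h : s + xd + (k : Int) * xd = s + ((k : Int) + 1) * xd := by ring
        rw [h]
    · simp only [List.length_cons]
      push_cast
      ring

-- A's nested append-fold characterised as a flatMap of maps
lemma a_fold (x0 y0 xd yd nx ny : Int) :
    (PySem.List.pyRange 0 nx 1).foldl (fun acc ix =>
        (PySem.List.pyRange 0 ny 1).foldl (fun acc iy =>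
          acc ++ [[(x0 + ix * xd, y0 + iy * yd),
                   (x0 + ix * xd, y0 + (iy + 1) * yd),
                   (x0 + (ix + 1) * xd, y0 + (iy + 1) * yd),
                   (x0 + (ix + 1) * xd, y0 + iy * yd)]]) acc) []
      = (PySem.List.pyRange 0 nx 1).flatMap (fun ix =>
          (PySem.List.pyRange 0 ny 1).map (fun iy =>
            [(x0 + ix * xd, y0 + iy * yd),
             (x0 + ix * xd, y0 + (iy + 1) * yd),
             (x0 + (ix + 1) * xd, y0 + (iy + 1) * yd),
             (x0 + (ix + 1) * xd, y0 + iy * yd)])) := by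
  have hinner : ∀ (acc : List (List (Int × Int))), ∀ ix ∈ PySem.List.pyRange 0 nx 1,
      (PySem.List.pyRange 0 ny 1).foldl (fun acc iy =>
          acc ++ [[(x0 + ix * xd, y0 + iy * yd),
                   (x0 + ix * xd, y0 + (iy + 1) * yd),
                   (x0 + (ix + 1) * xd, y0 + (iy + 1) * yd),
                   (x0 + (ix + 1) * xd, y0 + iy * yd)]]) acc
        = acc ++ (PySem.List.pyRange 0 ny 1).map (fun iy =>
            [(x0 + ix * xd, y0 + iy * yd),
             (x0 + ix * xd, y0 + (iy + 1) * yd),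
             (x0 + (ix + 1) * xd, y0 + (iy + 1) * yd),
             (x0 + (ix + 1) * xd, y0 + iy * yd)]) := by
    intro acc ix _
    exact PySem.List.foldl_append_singleton_eq_map _ _ _
  rw [PySem.List.foldl_congr_mem _ _ _ [] hinner,
      PySem.List.foldl_append_eq_flatMap]
  simp

lemma pyGet0 (xs : List (Int × Int)) (h : 3 ≤ xs.length) :
    PySem.List.pyGet? xs 0 = some (xs.getD 0 (0, 0)) := by
  rcases xs with _|⟨a,_|⟨b,_|⟨c,t⟩⟩⟩ <;> simp_all [PySem.List.pyGet?, PySem.List.pyIdx?, List.getD]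
  rw [if_pos (by omega)]; simp

lemma pyGet2 (xs : List (Int × Int)) (h : 3 ≤ xs.length) :
    PySem.List.pyGet? xs 2 = some (xs.getD 2 (0, 0)) := by
  rcases xs with _|⟨a,_|⟨b,_|⟨c,t⟩⟩⟩ <;> simp_all [PySem.List.pyGet?, PySem.List.pyIdx?, List.getD]
  rw [if_pos (by omega)]; simp

-- the two algorithms produce the same grid
lemma grid_eq (x0 y0 xd yd nx ny : Int) :
    (PySem.List.pyRange 0 nx 1).foldl (fun acc ix =>
        (PySem.List.pyRange 0 ny 1).foldl (fun acc iy =>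
          acc ++ [[(x0 + ix * xd, y0 + iy * yd),
                   (x0 + ix * xd, y0 + (iy + 1) * yd),
                   (x0 + (ix + 1) * xd, y0 + (iy + 1) * yd),
                   (x0 + (ix + 1) * xd, y0 + iy * yd)]]) acc) []
      = (let column := ((PySem.List.pyRange 0 ny 1).foldl
          (fun (st : List (List (Int × Int)) × Int) _ =>
            (st.1 ++ [[(x0, st.2), (x0, st.2 + yd), (x0 + xd, st.2 + yd), (x0 + xd, st.2)]],
             st.2 + yd)) ([], y0)).1
        ((PySem.List.pyRange 0 nx 1).foldl
          (fun (st : List (List (Int × Int)) × Int) _ =>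
            (st.1 ++ column.map (fun cell => cell.map (fun p => (p.1 + st.2, p.2))),
             st.2 + xd)) ([], 0)).1) := by
  rw [a_fold]
  simp only [col_fold, shift_fold, List.nil_append]
  have hnx : (PySem.List.pyRange 0 nx 1).length = nx.toNat := by
    rw [PySem.List.length_pyRange_one]; simp
  have hny : (PySem.List.pyRange 0 ny 1).length = ny.toNat := by
    rw [PySem.List.length_pyRange_one]; simp
  rw [hnx, hny, pyRange_zero_toNat nx, pyRange_zero_toNat ny, List.flatMap_map]
  refine List.flatMap_congr (fun k _ => ?_)
  rw [List.map_map, List.map_map]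
  refine List.map_congr_left (fun j _ => ?_)
  simp only [Function.comp_apply, List.map_cons, List.map_nil, List.cons.injEq,
    Prod.mk.injEq, and_true]
  and_intros <;> (first | trivial | ring)

theorem divide_frame_spec : Claim_equal_divide_frame := by
  intro ac xd yd _ hpre
  obtain ⟨hlen, hw, hh, hx, hy⟩ := hpre
  unfold Spec_divide_frame divide_frame divide_frame_alt
  rw [pyGet0 ac hlen, pyGet2 ac hlen]
  simp only [Option.bind_some, Option.map_some, Option.getD_some]
  rw [if_pos (by constructor <;> omega), if_pos ⟨hx, hy⟩,
      if_pos ⟨by omega, by omega, hx, hy⟩]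
  exact grid_eq _ _ _ _ _ _
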